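-- pv_equiv track=rewrite | github.com/JAAFAR1996/ai-tiddy-bear-v2 | src/infrastructure/security/sql_injection_protection.py | _assess_risk_level
-- ===== SOURCE A (Python) =====
-- from typing import Any, Dict, List, Optional
--
-- def _assess_risk_level(threats: List[str]) -> str:
--     """Assess risk level based on detected threats"""
--     if not threats:
--         return "none"
--
--     high_risk_patterns = ["DROP", "DELETE", "TRUNCATE", "ALTER", "CREATE"]
--     medium_risk_patterns = ["UNION", "SELECT", "INSERT", "UPDATE"]
--
--     threat_text = " ".join(threats).upper()
--
--     if any(pattern in threat_text for pattern in high_risk_patterns):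
--         return "critical"
--     elif any(pattern in threat_text for pattern in medium_risk_patterns):
--         return "high"
--     elif len(threats) > 1:
--         return "medium"
--     else:
--         return "low"
-- ===== SOURCE B (Python) =====
-- from typing import List
--
-- _HIGH = ("DROP", "DELETE", "TRUNCATE", "ALTER", "CREATE")
-- _MEDIUM = ("UNION", "SELECT", "INSERT", "UPDATE")
--
-- def _assess_risk_level(threats: List[str]) -> str:
--     """Assess risk level based on detected threats (single element-wise pass)."""
--     if not threats:
--         return "none"
--     found_high = False
--     found_medium = False
--     for t in threats:
--         u = t.upper()
--         if any(p in u for p in _HIGH):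
--             found_high = True
--         if any(p in u for p in _MEDIUM):
--             found_medium = True
--     if found_high:
--         return "critical"
--     if found_medium:
--         return "high"
--     if len(threats) > 1:
--         return "medium"
--     return "low"
-- ===== Notes on version B (the rewrite author's own statement) =====
-- stated objective: alternative
-- what changed: Instead of joining all threats into one uppercased string and scanning that whole string twice with any(), B makes a single element-wise pass over the list, uppercasing each threat once and accumulating found_high/found_medium flags, then decides the level after the loop; equivalence is exact because no pattern contains a space, so a match can never span the join boundaries.
import Mathlib
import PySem

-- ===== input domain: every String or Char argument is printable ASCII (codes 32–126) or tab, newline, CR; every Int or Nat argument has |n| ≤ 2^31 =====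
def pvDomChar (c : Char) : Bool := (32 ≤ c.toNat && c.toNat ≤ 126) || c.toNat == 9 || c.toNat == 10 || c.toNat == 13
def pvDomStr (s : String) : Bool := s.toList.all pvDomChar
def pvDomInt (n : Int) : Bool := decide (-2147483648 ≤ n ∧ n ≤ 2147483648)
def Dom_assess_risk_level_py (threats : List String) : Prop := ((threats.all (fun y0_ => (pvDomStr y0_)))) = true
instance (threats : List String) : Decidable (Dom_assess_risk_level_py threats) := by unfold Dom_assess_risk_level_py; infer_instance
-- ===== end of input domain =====

-- B replaces A's "join everything into one uppercased string and scan it twice with any()"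
-- by a single element-wise pass accumulating found_high/found_medium flags (objective: alternative decomposition;
-- exact because no pattern contains a space, so no match can span a join boundary).

-- ===== PORT A =====
def assess_risk_level_py (threats : List String) : String :=
  if threats = [] then "none"
  else
    let high_risk_patterns : List String := ["DROP", "DELETE", "TRUNCATE", "ALTER", "CREATE"]
    let medium_risk_patterns : List String := ["UNION", "SELECT", "INSERT", "UPDATE"]
    let threat_text := PySem.Str.upper (PySem.Str.join " " threats)
    if high_risk_patterns.any (fun pattern => PySem.Str.isIn pattern threat_text) then "critical"
    else if medium_risk_patterns.any (fun pattern => PySem.Str.isIn pattern threat_text) then "high"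
    else if 1 < threats.length then "medium"
    else "low"

-- ===== PORT B =====
def pvHighPatterns : List String := ["DROP", "DELETE", "TRUNCATE", "ALTER", "CREATE"]
def pvMediumPatterns : List String := ["UNION", "SELECT", "INSERT", "UPDATE"]

-- the loop body of Source B: update (found_high, found_medium) from one threat
def pvFlagStep (fl : Bool × Bool) (t : String) : Bool × Bool :=
  let u := PySem.Str.upper t
  (fl.1 || pvHighPatterns.any (fun p => PySem.Str.isIn p u),
   fl.2 || pvMediumPatterns.any (fun p => PySem.Str.isIn p u))

def assess_risk_level_py_alt (threats : List String) : String :=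
  if threats = [] then "none"
  else
    let fl := threats.foldl pvFlagStep (false, false)
    if fl.1 then "critical"
    else if fl.2 then "high"
    else if 1 < threats.length then "medium"
    else "low"

-- ===== PRECONDITION & SPEC =====
def Spec_assess_risk_level_py (threats : List String) (out : String) : Prop := out = assess_risk_level_py_alt threats
instance (threats : List String) (out : String) : Decidable (Spec_assess_risk_level_py threats out) := by unfold Spec_assess_risk_level_py; infer_instance

-- ===== CLAIM (what is proved, stated in full; the proofs are below) =====
def Claim_equal_assess_risk_level_py : Prop := ∀ (threats : List String), Dom_assess_risk_level_py threats → Spec_assess_risk_level_py threats (assess_risk_level_py threats)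

-- ===== LEMMAS AND PROOFS =====

-- a prefix of a ++ c :: b that avoids c is a prefix of a
theorem pv_prefix_split {p a b : List Char} {c : Char} (hc : c ∉ p)
    (h : p <+: a ++ c :: b) : p <+: a := by
  induction p generalizing a with
  | nil => exact List.nil_prefix
  | cons y p' ih =>
    cases a with
    | nil =>
      rw [List.nil_append, List.cons_prefix_cons] at h
      exact absurd (h.1 ▸ List.mem_cons_self) hc
    | cons z a' =>
      rw [List.cons_append, List.cons_prefix_cons] at h
      rw [List.cons_prefix_cons]
      exact ⟨h.1, ih (fun hm => hc (List.mem_cons_of_mem _ hm)) h.2⟩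

-- an infix of a ++ c :: b that avoids c lies wholly in a or wholly in b
theorem pv_infix_split {p : List Char} {c : Char} (a b : List Char) (hc : c ∉ p) :
    p <:+: a ++ c :: b ↔ p <:+: a ∨ p <:+: b := by
  induction a with
  | nil =>
    rw [List.nil_append, List.infix_cons_iff]
    constructor
    · rintro (h | h)
      · cases p with
        | nil => exact Or.inl List.nil_infix
        | cons y p' =>
          rw [List.cons_prefix_cons] at h
          exact absurd (h.1 ▸ List.mem_cons_self) hc
      · exact Or.inr h
    · rintro (h | h)
      · rcases List.eq_nil_of_infix_nil h with rfl
        exact Or.inl List.nil_prefix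
      · exact Or.inr h
  | cons x a' ih =>
    rw [List.cons_append, List.infix_cons_iff, List.infix_cons_iff, ih]
    constructor
    · rintro (h | h | h)
      · exact Or.inl (Or.inl (pv_prefix_split (a := x :: a') hc h))
      · exact Or.inl (Or.inr h)
      · exact Or.inr h
    · rintro ((h | h) | h)
      · exact Or.inl (h.trans (List.prefix_append _ _))
      · exact Or.inr (Or.inl h)
      · exact Or.inr (Or.inr h)

-- a space-free nonempty pattern is in " ".join(cs) iff it is in one of the pieces
theorem pv_infix_join {p : List Char} (cs : List (List Char))
    (h1 : ' ' ∉ p) (h2 : p ≠ []) :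
    p <:+: PySem.Chars.join [' '] cs ↔ ∃ c ∈ cs, p <:+: c := by
  induction cs with
  | nil =>
    rw [PySem.Chars.join_nil]
    simp only [List.not_mem_nil, false_and, exists_false, iff_false]
    intro h
    exact h2 (List.eq_nil_of_infix_nil h)
  | cons a rest ih =>
    cases rest with
    | nil => simp [PySem.Chars.join_singleton]
    | cons b rest' =>
      rw [PySem.Chars.join_cons_cons]
      have : a ++ [' '] ++ PySem.Chars.join [' '] (b :: rest')
           = a ++ ' ' :: PySem.Chars.join [' '] (b :: rest') := by
        rw [List.append_assoc, List.singleton_append]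
      rw [this, pv_infix_split _ _ h1, ih]
      simp [or_and_right, exists_or]

-- upper distributes over the space-join (upper is a char map fixing ' ')
theorem pv_upper_join (cs : List (List Char)) :
    PySem.Chars.upper (PySem.Chars.join [' '] cs)
      = PySem.Chars.join [' '] (cs.map PySem.Chars.upper) := by
  induction cs with
  | nil => rw [PySem.Chars.join_nil]; rfl
  | cons a rest ih =>
    cases rest with
    | nil => simp [PySem.Chars.join_singleton]
    | cons b rest' =>
      rw [List.map_cons, List.map_cons, PySem.Chars.join_cons_cons,
          PySem.Chars.join_cons_cons, ← List.map_cons (f := PySem.Chars.upper) (a := b) (l := rest'), ← ih]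
      simp only [PySem.Chars.upper, List.map_append]
      rfl

-- a space-free nonempty pattern is in " ".join(ts).upper() iff it is in some t.upper()
theorem pv_isIn_join_upper (p : String) (ts : List String)
    (h1 : ' ' ∉ p.toList) (h2 : p.toList ≠ []) :
    PySem.Str.isIn p (PySem.Str.upper (PySem.Str.join " " ts)) = true
      ↔ ∃ t ∈ ts, PySem.Str.isIn p (PySem.Str.upper t) = true := by
  rw [PySem.Str.isIn_iff_infix, PySem.Str.toList_upper, PySem.Str.toList_join]
  have hsep : (" " : String).toList = [' '] := rfl
  rw [hsep, pv_upper_join, List.map_map, pv_infix_join _ h1 h2]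
  simp only [List.mem_map, Function.comp]
  constructor
  · rintro ⟨c, ⟨t, ht, rfl⟩, hin⟩
    exact ⟨t, ht, by rw [PySem.Str.isIn_iff_infix, PySem.Str.toList_upper]; exact hin⟩
  · rintro ⟨t, ht, hin⟩
    rw [PySem.Str.isIn_iff_infix, PySem.Str.toList_upper] at hin
    exact ⟨_, ⟨t, ht, rfl⟩, hin⟩

-- swap the two any()-scans: pattern-over-joined-text = threat-over-patterns
theorem pv_any_swap (pats ts : List String)
    (hp : ∀ p ∈ pats, ' ' ∉ p.toList ∧ p.toList ≠ []) :
    pats.any (fun p => PySem.Str.isIn p (PySem.Str.upper (PySem.Str.join " " ts)))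
      = ts.any (fun t => pats.any (fun p => PySem.Str.isIn p (PySem.Str.upper t))) := by
  rw [Bool.eq_iff_iff]
  simp only [List.any_eq_true]
  constructor
  · rintro ⟨p, hpmem, hin⟩
    obtain ⟨t, ht, hin'⟩ := (pv_isIn_join_upper p ts (hp p hpmem).1 (hp p hpmem).2).mp hin
    exact ⟨t, ht, p, hpmem, hin'⟩
  · rintro ⟨t, ht, p, hpmem, hin⟩
    exact ⟨p, hpmem, (pv_isIn_join_upper p ts (hp p hpmem).1 (hp p hpmem).2).mpr ⟨t, ht, hin⟩⟩

-- characterisation of B's single-pass flag fold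
theorem pv_foldl_flags (ts : List String) (init : Bool × Bool) :
    ts.foldl pvFlagStep init
      = (init.1 || ts.any (fun t => pvHighPatterns.any (fun p => PySem.Str.isIn p (PySem.Str.upper t))),
         init.2 || ts.any (fun t => pvMediumPatterns.any (fun p => PySem.Str.isIn p (PySem.Str.upper t)))) := by
  induction ts generalizing init with
  | nil => simp
  | cons t rest ih =>
    rw [List.foldl_cons, ih]
    simp [pvFlagStep, Bool.or_assoc]

-- ===== VERDICT (by name: the statement is the Claim_ definition above) =====
theorem assess_risk_level_py_spec : Claim_equal_assess_risk_level_py := by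
  intro threats _
  unfold Spec_assess_risk_level_py assess_risk_level_py assess_risk_level_py_alt
  by_cases hne : threats = []
  · simp [hne]
  · simp only [if_neg hne]
    rw [pv_foldl_flags threats (false, false)]
    have h1 := pv_any_swap ["DROP", "DELETE", "TRUNCATE", "ALTER", "CREATE"] threats (by decide)
    have h2 := pv_any_swap ["UNION", "SELECT", "INSERT", "UPDATE"] threats (by decide)
    rw [h1, h2]
    simp [pvHighPatterns, pvMediumPatterns]
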